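-- pv_equiv track=rewrite | github.com/pypi-data/pypi-mirror-328 | packages/VoPho/VoPho-0.0.19-py3-none-any.whl/VoPho/phonemizers/japanese.py | replace_repeated_chars
-- ===== SOURCE A (Python) =====
-- def replace_repeated_chars(input_string):
--     result = []
--     i = 0
--     while i < len(input_string):
--         if i + 1 < len(input_string) and input_string[i] == input_string[i + 1] and input_string[i] in 'aiueo':
--             result.append(input_string[i] + 'ː')
--             i += 2
--         else:
--             result.append(input_string[i])
--             i += 1
--     return ''.join(result)
-- ===== SOURCE B (Python) =====
-- def replace_repeated_chars(input_string):
--     out = []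
--     i = 0
--     n = len(input_string)
--     while i < n:
--         c = input_string[i]
--         j = i + 1
--         while j < n and input_string[j] == c:
--             j += 1
--         run = j - i
--         if c in 'aiueo':
--             out.append((c + 'ː') * (run // 2) + c * (run % 2))
--         else:
--             out.append(c * run)
--         i = j
--     return ''.join(out)
-- ===== Notes on version B (the rewrite author's own statement) =====
-- stated objective: alternative
-- what changed: B replaces A's char-by-char index walk with run-length decomposition: it finds each maximal run of equal characters and emits the whole run's replacement in closed form ((c+'ː')*(run//2)+c*(run%2) for vowels, c*run otherwise).
import Mathlib
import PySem

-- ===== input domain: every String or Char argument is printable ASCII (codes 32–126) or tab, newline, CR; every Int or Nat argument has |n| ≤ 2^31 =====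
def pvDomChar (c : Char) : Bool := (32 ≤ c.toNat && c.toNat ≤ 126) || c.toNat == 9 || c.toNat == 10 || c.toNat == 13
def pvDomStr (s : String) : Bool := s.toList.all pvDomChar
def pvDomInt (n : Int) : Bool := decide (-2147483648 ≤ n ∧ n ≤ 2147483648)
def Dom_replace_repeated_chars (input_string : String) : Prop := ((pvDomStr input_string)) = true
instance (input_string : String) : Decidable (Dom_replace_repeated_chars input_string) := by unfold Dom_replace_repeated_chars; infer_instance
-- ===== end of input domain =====

-- B reorganises A's pairwise index walk into run-length decomposition with a closed-form block per run (objective: alternative, same cost).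

def pvVowel (c : Char) : Bool := c == 'a' || c == 'i' || c == 'u' || c == 'e' || c == 'o'

-- ===== PORT A =====
-- A's while loop over index i, transcribed as recursion on the remaining characters.
def pvGoA : List Char → List Char
  | [] => []
  | [c] => [c]
  | c :: c2 :: rest =>
    if c == c2 && pvVowel c then c :: 'ː' :: pvGoA rest
    else c :: pvGoA (c2 :: rest)

def replace_repeated_chars (input_string : String) : String :=
  String.ofList (pvGoA input_string.toList)

-- ===== PORT B =====
-- closed-form replacement for one maximal run of `run` copies of c
def pvPairBlock (c : Char) (run : Nat) : List Char :=
  if pvVowel c then (List.replicate (run / 2) [c, 'ː']).flatten ++ List.replicate (run % 2) c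
  else List.replicate run c

def pvGoB : List Char → List Char
  | [] => []
  | c :: rest =>
    pvPairBlock c (1 + (rest.takeWhile (· == c)).length) ++ pvGoB (rest.dropWhile (· == c))
termination_by l => l.length
decreasing_by
  simp only [List.length_cons]
  exact Nat.lt_succ_of_le (List.length_dropWhile_le _ _)

def replace_repeated_chars_alt (input_string : String) : String :=
  String.ofList (pvGoB input_string.toList)

-- ===== PRECONDITION & SPEC =====
def Spec_replace_repeated_chars (input_string : String) (out : String) : Prop := out = replace_repeated_chars_alt input_string
instance (input_string : String) (out : String) : Decidable (Spec_replace_repeated_chars input_string out) := by unfold Spec_replace_repeated_chars; infer_instance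

-- ===== CLAIM (what is proved, stated in full; the proofs are below) =====
def Claim_equal_replace_repeated_chars : Prop := ∀ (input_string : String), Dom_replace_repeated_chars input_string → Spec_replace_repeated_chars input_string (replace_repeated_chars input_string)

-- ===== LEMMAS AND PROOFS =====

theorem pvGoA_nonvowel (c : Char) (hv : pvVowel c = false) (t : List Char) :
    pvGoA (c :: t) = c :: pvGoA t := by
  cases t with
  | nil => rfl
  | cons d t' => simp [pvGoA, hv]

theorem pvGoA_replicate_nonvowel (c : Char) (hv : pvVowel c = false) :
    ∀ (n : Nat) (t : List Char), pvGoA (List.replicate n c ++ t) = List.replicate n c ++ pvGoA t := by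
  intro n
  induction n with
  | zero => intro t; simp
  | succ m ih =>
    intro t
    simp only [List.replicate_succ, List.cons_append]
    rw [pvGoA_nonvowel c hv, ih]

theorem pvGoA_replicate_vowel (c : Char) (hv : pvVowel c = true) :
    ∀ (n : Nat) (t : List Char), t.head? ≠ some c →
      pvGoA (List.replicate n c ++ t) = pvPairBlock c n ++ pvGoA t := by
  intro n
  induction n using Nat.strong_induction_on with
  | _ n ih =>
    match n with
    | 0 => intro t _; simp [pvPairBlock, hv]
    | 1 =>
      intro t ht
      cases t with
      | nil => simp [pvGoA, pvPairBlock, hv]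
      | cons d t' =>
        have hdc : (c == d) = false := by
          simp only [List.head?] at ht
          simp
          intro h; exact ht (by rw [h])
        simp [pvGoA, pvPairBlock, hv, hdc]
    | (m+2) =>
      intro t ht
      have : List.replicate (m+2) c ++ t = c :: c :: (List.replicate m c ++ t) := by
        simp [List.replicate_succ]
      rw [this]
      simp only [pvGoA, beq_self_eq_true, hv, Bool.and_self, if_true]
      rw [ih m (by omega) t ht]
      have hdiv : (m + 2) / 2 = m / 2 + 1 := by omega
      have hmod : (m + 2) % 2 = m % 2 := by omega
      simp [pvPairBlock, hv, hdiv, hmod, List.replicate_succ]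

theorem head?_dropWhile_ne (c : Char) :
    ∀ (l : List Char), (l.dropWhile (· == c)).head? ≠ some c := by
  intro l
  induction l with
  | nil => simp
  | cons d t ih =>
    by_cases h : (d == c) = true
    · simpa [List.dropWhile_cons, h] using ih
    · simp [h]
      intro hcd
      exact absurd (by simp [hcd]) h

theorem takeWhile_eq_replicate (c : Char) (l : List Char) :
    l.takeWhile (· == c) = List.replicate (l.takeWhile (· == c)).length c := by
  rw [List.eq_replicate_iff]
  refine ⟨rfl, ?_⟩
  intro b hb
  have := List.mem_takeWhile_imp hb
  simpa [beq_iff_eq] using this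

theorem pvGoA_eq_pvGoB_bounded :
    ∀ (n : Nat) (l : List Char), l.length ≤ n → pvGoA l = pvGoB l := by
  intro n
  induction n with
  | zero =>
    intro l hl
    have : l = [] := List.eq_nil_of_length_eq_zero (Nat.le_zero.mp hl)
    subst this; simp [pvGoA, pvGoB]
  | succ m ih =>
    intro l hl
    cases l with
    | nil => simp [pvGoA, pvGoB]
    | cons c rest =>
      have hsplit : c :: rest
          = List.replicate (1 + (rest.takeWhile (· == c)).length) c ++ rest.dropWhile (· == c) := by
        conv_lhs => rw [← List.takeWhile_append_dropWhile (p := (· == c)) (l := rest)]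
        rw [Nat.add_comm, List.replicate_succ]
        simp [← takeWhile_eq_replicate]
      have hlen : (rest.dropWhile (· == c)).length ≤ m := by
        have h1 := List.length_dropWhile_le (p := (· == c)) (l := rest)
        simp at hl; omega
      have hihd := ih _ hlen
      have hB : pvGoB (c :: rest)
          = pvPairBlock c (1 + (rest.takeWhile (· == c)).length)
            ++ pvGoB (rest.dropWhile (· == c)) := by
        rw [pvGoB]
      by_cases hv : pvVowel c = true
      · conv_lhs => rw [hsplit]
        rw [pvGoA_replicate_vowel c hv _ _ (head?_dropWhile_ne c rest), hihd, hB]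
      · conv_lhs => rw [hsplit]
        rw [pvGoA_replicate_nonvowel c (by simpa using hv), hihd, hB]
        have : pvPairBlock c (1 + (rest.takeWhile (· == c)).length)
            = List.replicate (1 + (rest.takeWhile (· == c)).length) c := by
          simp [pvPairBlock, (by simpa using hv : pvVowel c = false)]
        rw [this]

-- ===== VERDICT (by name: the statement is the Claim_ definition above) =====
theorem replace_repeated_chars_spec : Claim_equal_replace_repeated_chars := by
  intro s _
  unfold Spec_replace_repeated_chars replace_repeated_chars replace_repeated_chars_alt
  rw [pvGoA_eq_pvGoB_bounded s.toList.length s.toList le_rfl]
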